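-- pv_equiv track=rewrite | github.com/wind23/renju-python | renju/base.py | strxy_to_coordinate
-- ===== SOURCE A (Python) =====
-- def strxy_to_coordinate(pos_x, pos_y):
--     pos_x = pos_x.lower()
--     x = 0
--     for i in pos_x:
--         x = x * 26 + ord(i) - ord('a') + 1
--     x -= 1
--     y = int(pos_y) - 1
--     return (x, y)
-- ===== SOURCE B (Python) =====
-- def strxy_to_coordinate(pos_x, pos_y):
--     # right-to-left positional weighting instead of Horner folding
--     x = 0
--     weight = 1
--     for c in reversed(pos_x.lower()):
--         x += (ord(c) - ord('a') + 1) * weight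
--         weight *= 26
--     return (x - 1, int(pos_y) - 1)
-- ===== Notes on version B (the rewrite author's own statement) =====
-- stated objective: alternative
-- what changed: Replaces the left-to-right Horner accumulator with a right-to-left traversal maintaining an explicit power-of-26 place value; y handling unchanged.
import Mathlib
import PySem

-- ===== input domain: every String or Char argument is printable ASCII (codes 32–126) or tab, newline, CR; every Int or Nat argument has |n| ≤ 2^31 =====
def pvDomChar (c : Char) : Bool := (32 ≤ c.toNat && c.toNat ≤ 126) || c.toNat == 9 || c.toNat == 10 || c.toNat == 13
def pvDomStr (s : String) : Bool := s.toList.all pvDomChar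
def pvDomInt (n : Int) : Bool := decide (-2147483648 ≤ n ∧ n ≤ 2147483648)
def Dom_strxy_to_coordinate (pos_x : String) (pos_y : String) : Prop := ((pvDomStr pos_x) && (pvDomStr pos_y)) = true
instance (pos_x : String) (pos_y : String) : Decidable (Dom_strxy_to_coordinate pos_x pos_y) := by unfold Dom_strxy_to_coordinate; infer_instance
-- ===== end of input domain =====

-- B replaces A's left-to-right Horner fold by a right-to-left pass with an explicit power-of-26 place value (alternative decomposition, same cost).


-- ===== PORT A =====
-- Horner fold: x = x * 26 + ord(i) - ord('a') + 1 over the lowered string, then y = int(pos_y) - 1.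
-- 'int(pos_y)' raising ValueError (ofStr? = none) is excluded by Pre_; getD 0 is never taken there.
def strxy_to_coordinate (pos_x : String) (pos_y : String) : Int × Int :=
  let px := PySem.Str.lower pos_x
  let x : Int := px.toList.foldl (fun x i => x * 26 + (i.toNat : Int) - 97 + 1) 0
  let x := x - 1
  let y : Int := (PySem.Int.ofStr? pos_y).getD 0 - 1
  (x, y)

-- ===== PORT B =====
-- Right-to-left pass carrying (accumulated x, place-value weight); weight starts at 1 and is multiplied by 26.
def strxy_to_coordinate_alt (pos_x : String) (pos_y : String) : Int × Int :=
  let r : Int × Int :=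
    (PySem.Str.lower pos_x).toList.reverse.foldl
      (fun (p : Int × Int) c => (p.1 + ((c.toNat : Int) - 97 + 1) * p.2, p.2 * 26)) (0, 1)
  (r.1 - 1, (PySem.Int.ofStr? pos_y).getD 0 - 1)

-- ===== PRECONDITION & SPEC =====
-- Pre_ excludes exactly the inputs where Python's int(pos_y) raises ValueError (both A and B raise there).
def Pre_strxy_to_coordinate (pos_x : String) (pos_y : String) : Prop :=
  (PySem.Int.ofStr? pos_y).isSome = true
instance (pos_x : String) (pos_y : String) : Decidable (Pre_strxy_to_coordinate pos_x pos_y) := by unfold Pre_strxy_to_coordinate; infer_instance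
def pvWitness_strxy_to_coordinate : String × String := ("aB", " 7 ")
def Spec_strxy_to_coordinate (pos_x : String) (pos_y : String) (out : Int × Int) : Prop := out = strxy_to_coordinate_alt pos_x pos_y
instance (pos_x : String) (pos_y : String) (out : Int × Int) : Decidable (Spec_strxy_to_coordinate pos_x pos_y out) := by unfold Spec_strxy_to_coordinate; infer_instance

-- ===== CLAIM (what is proved, stated in full; the proofs are below) =====
def Claim_equal_strxy_to_coordinate : Prop := ∀ (pos_x : String) (pos_y : String), Dom_strxy_to_coordinate pos_x pos_y → Pre_strxy_to_coordinate pos_x pos_y → Spec_strxy_to_coordinate pos_x pos_y (strxy_to_coordinate pos_x pos_y)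

-- ===== LEMMAS AND PROOFS =====
-- B's weighted fold over cs equals x + w * (Horner value of cs read right-to-left).
theorem b_fold_char (cs : List Char) : ∀ (x w : Int),
    (cs.foldl (fun (p : Int × Int) c => (p.1 + ((c.toNat : Int) - 97 + 1) * p.2, p.2 * 26)) (x, w)).1
      = x + w * (cs.reverse.foldl (fun a c => a * 26 + (c.toNat : Int) - 97 + 1) 0) := by
  induction cs with
  | nil => intro x w; simp
  | cons c t ih =>
    intro x w
    simp only [List.foldl_cons, List.reverse_cons, List.foldl_append, List.foldl_cons,
      List.foldl_nil, ih]
    ring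

theorem strxy_to_coordinate_eq (pos_x pos_y : String) :
    strxy_to_coordinate pos_x pos_y = strxy_to_coordinate_alt pos_x pos_y := by
  simp only [strxy_to_coordinate, strxy_to_coordinate_alt, b_fold_char, List.reverse_reverse]
  ring_nf

-- ===== VERDICT (by name: the statement is the Claim_ definition above) =====
theorem strxy_to_coordinate_spec : Claim_equal_strxy_to_coordinate := by
  intro px py _ _
  exact strxy_to_coordinate_eq px py
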